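-- pv_equiv track=rewrite | github.com/EDalSanto/MIT-6.00.1x | nfruits.py | nfruits
-- ===== SOURCE A (Python) =====
-- def nfruits(fruit, eaten):
--     """
--     fruit is a non-empty dictionary containing type of fruit
--     and its quantity initially with Python when he leaves home (length < 10)
--     eaten is a 'string' pattern documenting types and # of fruits eaten along
--     journey.
--     After each fruit he eats (except the last one which he eats just on
--     reaching the campus),
--     adds 1 fruit of each type other than the one just had.
--     returns max value of 3 keys in dict
--     """
--     #assert length of dict 'ifruits' is between 0 and 10
--     assert 0 < len(fruit) < 10
--     #loop through fruits eaten to decrease value of key i in dict fruit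
--     for i in eaten:
--         fruit[i] -= 1
--     #loop through fruits eaten, exlcuding last 1, to increase value
--     #of other keys, non-i, in dict fruit
--     for i in eaten[:-1]:
--         for key in fruit:
--             if key != i:
--                 fruit[key] += 1
--     return max(fruit.values())
-- ===== SOURCE B (Python) =====
-- def nfruits(fruit, eaten):
--     # Closed form: each fruit type's final value is v + m - 2*c + (1 if it was the last
--     # fruit eaten), where c = times that type was eaten and m = len(eaten) - 1 (0 if
--     # nothing eaten); one tally pass over eaten, one flat pass with a running maximum.
--     # fruit is not mutated (A mutates its dict argument; return values agree).
--     assert 0 < len(fruit) < 10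
--     counts = {k: 0 for k in fruit}
--     for ch in eaten:
--         counts[ch] += 1
--     m = 0 if not eaten else len(eaten) - 1
--     last = None if not eaten else eaten[-1]
--     best = None
--     for k, v in fruit.items():
--         final = v + m - 2 * counts[k] + (1 if k == last else 0)
--         if best is None or final > best:
--             best = final
--     return best
-- ===== Notes on version B (the rewrite author's own statement) =====
-- stated objective: faster
-- what changed: Replaces A's dict simulation (decrement loop plus nested add-one-to-every-other-key loop, then max over the mutated dict) by a per-key closed form v + m - 2*count(k) + last-eaten indicator computed from a zero-initialised tally of eaten in one flat pass with a running maximum; B does not mutate the dict (return values agree).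
import Mathlib
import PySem

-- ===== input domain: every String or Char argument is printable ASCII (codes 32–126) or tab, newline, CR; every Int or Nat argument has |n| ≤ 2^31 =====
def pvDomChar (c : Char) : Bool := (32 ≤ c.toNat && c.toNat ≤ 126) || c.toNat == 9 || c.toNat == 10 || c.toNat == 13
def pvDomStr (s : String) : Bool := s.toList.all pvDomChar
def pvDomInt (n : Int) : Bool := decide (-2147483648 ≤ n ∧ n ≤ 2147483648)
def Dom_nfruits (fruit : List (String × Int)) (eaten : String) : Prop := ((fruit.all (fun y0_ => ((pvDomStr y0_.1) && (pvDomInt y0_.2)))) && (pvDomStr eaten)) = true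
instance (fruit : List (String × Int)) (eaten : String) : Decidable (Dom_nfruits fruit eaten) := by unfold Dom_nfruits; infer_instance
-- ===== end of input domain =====

-- B replaces A's dict simulation (decrement pass + nested add-one-to-every-other-key pass,
-- then max over the mutated dict) by a per-key closed form v + m - 2*count(k) + last-eaten
-- indicator, computed from a zero-initialised tally of eaten in one flat pass with a running
-- maximum; B does not mutate the dict argument (A does) — the equivalence proved is about the
-- return value only.


-- ===== PORT A =====
def nfruits (fruit : List (String × Int)) (eaten : String) : Int :=
  let d0 : PySem.Dict String Int := PySem.Dict.ofList fruit
  -- assert 0 < len(fruit) < 10  → Pre_nfruits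
  let d1 := eaten.toList.foldl (fun d c => d.modify (String.ofList [c]) 0 (fun v => v - 1)) d0
  let d2 := (PySem.Chars.slice eaten.toList none (some (-1))).foldl
      (fun d i => d.keys.foldl
        (fun d' key => if key ≠ String.ofList [i] then d'.modify key 0 (fun v => v + 1) else d') d) d1
  (PySem.List.max? d2.values (fun v => v)).getD 0

-- ===== PORT B =====
def nfruits_alt (fruit : List (String × Int)) (eaten : String) : Int :=
  -- assert 0 < len(fruit) < 10  → Pre_nfruits
  -- counts = {k: 0 for k in fruit}
  let counts0 : PySem.Dict String Int :=
    (PySem.Dict.ofList fruit).keys.foldl (fun cd k => cd.insert k 0) PySem.Dict.empty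
  -- counts[ch] += 1  (Python raises KeyError when ch is no fruit type → Pre_nfruits;
  -- modify's default is never reached inside Pre_)
  let counts : PySem.Dict String Int := eaten.toList.foldl
      (fun cd ch => cd.modify (String.ofList [ch]) 0 (fun v => v + 1)) counts0
  let m : Int := if eaten.toList.isEmpty then 0 else (eaten.toList.length : Int) - 1
  -- eaten[-1] is a 1-char string in Python; ported as the Char mapped to a singleton String
  let last : Option String := if eaten.toList.isEmpty then none
      else (PySem.Str.pyGet? eaten (-1)).map (fun c => String.ofList [c])
  let best : Option Int := (PySem.Dict.ofList fruit).items.foldl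
      (fun best kv =>
        let fin := kv.2 + m - 2 * counts.getD kv.1 0 + (if some kv.1 = last then 1 else 0)
        match best with
        | none => some fin
        | some b => if fin > b then some fin else some b) none
  -- Pre_nfruits guarantees the dict is non-empty, so best is never None in Python
  best.getD 0

-- ===== PRECONDITION & SPEC =====
-- Pre_ excludes exactly the inputs on which Python A raises: the assert (the dict built
-- from fruit must have between 1 and 9 keys) and the KeyError when a character of eaten
-- is not a key of fruit.
def Pre_nfruits (fruit : List (String × Int)) (eaten : String) : Prop :=
  0 < (PySem.Dict.ofList fruit).keys.length ∧
  (PySem.Dict.ofList fruit).keys.length < 10 ∧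
  (eaten.toList.all (fun c => (PySem.Dict.ofList fruit).contains (String.ofList [c]))) = true
instance (fruit : List (String × Int)) (eaten : String) : Decidable (Pre_nfruits fruit eaten) := by
  unfold Pre_nfruits; infer_instance
def pvWitness_nfruits : (List (String × Int)) × String := ([("a", 3), ("b", 2)], "aba")

def Spec_nfruits (fruit : List (String × Int)) (eaten : String) (out : Int) : Prop := out = nfruits_alt fruit eaten
instance (fruit : List (String × Int)) (eaten : String) (out : Int) : Decidable (Spec_nfruits fruit eaten out) := by unfold Spec_nfruits; infer_instance

-- ===== CLAIM (what is proved, stated in full; the proofs are below) =====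
def Claim_equal_nfruits : Prop := ∀ (fruit : List (String × Int)) (eaten : String), Dom_nfruits fruit eaten → Pre_nfruits fruit eaten → Spec_nfruits fruit eaten (nfruits fruit eaten)

-- ===== LEMMAS AND PROOFS =====

-- A's first loop (all touched keys present): keys preserved, each key loses its eaten count.
theorem foldA1 (cs : List Char) (d : PySem.Dict String Int)
    (h : ∀ c ∈ cs, String.ofList [c] ∈ d.keys) :
    ((cs.foldl (fun d c => d.modify (String.ofList [c]) 0 (fun v => v - 1)) d).keys = d.keys)
    ∧ ∀ x, (cs.foldl (fun d c => d.modify (String.ofList [c]) 0 (fun v => v - 1)) d).getD x 0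
        = d.getD x 0 - ((cs.map (fun c => String.ofList [c])).count x : Int) := by
  induction cs generalizing d with
  | nil => simp
  | cons c cs ih =>
    have hc : String.ofList [c] ∈ d.keys := h c (List.mem_cons_self ..)
    have hkeys : (d.modify (String.ofList [c]) 0 (fun v => v - 1)).keys = d.keys := by
      rw [PySem.Dict.keys_modify, PySem.Dict.keys_insert_of_contains]
      exact (PySem.Dict.contains_iff_mem_keys d _).2 hc
    obtain ⟨hk, hg⟩ := ih (d.modify (String.ofList [c]) 0 (fun v => v - 1))
      (by intro a ha; rw [hkeys]; exact h a (List.mem_cons_of_mem _ ha))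
    simp only [List.foldl_cons]
    refine ⟨by rw [hk, hkeys], fun x => ?_⟩
    rw [hg x, PySem.Dict.getD_modify]
    by_cases hx : x = String.ofList [c]
    · subst hx; simp; omega
    · have : ¬ String.ofList [c] = x := fun hh => hx hh.symm
      simp [hx, this]

-- A's inner pass over the current keys: keys preserved, each listed key ≠ i gains 1.
theorem foldAinner_keys (ks : List String) (i : String) (d : PySem.Dict String Int)
    (h : ∀ k ∈ ks, k ∈ d.keys) :
    (ks.foldl (fun d' key => if key ≠ i then d'.modify key 0 (fun v => v + 1) else d') d).keys
      = d.keys := by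
  induction ks generalizing d with
  | nil => rfl
  | cons k ks ih =>
    have hk : k ∈ d.keys := h k (List.mem_cons_self ..)
    have hkeys : (if k ≠ i then d.modify k 0 (fun v => v + 1) else d).keys = d.keys := by
      split
      · rw [PySem.Dict.keys_modify, PySem.Dict.keys_insert_of_contains]
        exact (PySem.Dict.contains_iff_mem_keys d k).2 hk
      · rfl
    simp only [List.foldl_cons]
    rw [ih _ (by intro y hy; rw [hkeys]; exact h y (List.mem_cons_of_mem _ hy)), hkeys]

theorem foldAinner_getD (ks : List String) (i : String) (d : PySem.Dict String Int)
    (hnd : ks.Nodup) (x : String) :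
    (ks.foldl (fun d' key => if key ≠ i then d'.modify key 0 (fun v => v + 1) else d') d).getD x 0
      = d.getD x 0 + (if x ∈ ks ∧ x ≠ i then 1 else 0) := by
  induction ks generalizing d with
  | nil => simp
  | cons k ks ih =>
    simp only [List.foldl_cons]
    rw [ih _ hnd.of_cons]
    rcases List.nodup_cons.1 hnd with ⟨hkn, _⟩
    by_cases hki : k = i
    · subst hki
      by_cases hxk : x = k
      · subst hxk; simp [hkn]
      · simp [hxk, List.mem_cons]
    · rw [if_pos hki, PySem.Dict.getD_modify]
      by_cases hxk : x = k
      · subst hxk; simp [hkn, hki]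
      · simp [hxk, List.mem_cons]

-- A's outer loop: after all prefix characters, key x has gained (#prefix − #occurrences of x).
theorem foldAouter (cs : List Char) (d : PySem.Dict String Int) (hnd : d.keys.Nodup) :
    ((cs.foldl (fun d i => d.keys.foldl
      (fun d' key => if key ≠ String.ofList [i] then d'.modify key 0 (fun v => v + 1) else d') d) d).keys = d.keys)
    ∧ ∀ x, (cs.foldl (fun d i => d.keys.foldl
      (fun d' key => if key ≠ String.ofList [i] then d'.modify key 0 (fun v => v + 1) else d') d) d).getD x 0 = d.getD x 0 +
      (if x ∈ d.keys then ((cs.length : Int) - ((cs.map (fun c => String.ofList [c])).count x : Int))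
       else 0) := by
  induction cs generalizing d with
  | nil => simp
  | cons c cs ih =>
    simp only [List.foldl_cons]
    set d1 := d.keys.foldl
      (fun d' key => if key ≠ String.ofList [c] then d'.modify key 0 (fun v => v + 1) else d') d with hd1
    have hkeys1 : d1.keys = d.keys := foldAinner_keys d.keys (String.ofList [c]) d (fun _ h => h)
    have hget1 : ∀ x, d1.getD x 0 = d.getD x 0 + (if x ∈ d.keys ∧ x ≠ String.ofList [c] then 1 else 0) :=
      foldAinner_getD d.keys (String.ofList [c]) d hnd
    obtain ⟨hkeys2, hget2⟩ := ih d1 (hkeys1 ▸ hnd)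
    refine ⟨by rw [hkeys2, hkeys1], fun x => ?_⟩
    rw [hget2 x, hget1 x, hkeys1]
    by_cases hx : x ∈ d.keys
    · by_cases hxc : x = String.ofList [c]
      · subst hxc
        simp only [hx, List.map_cons, List.count_cons_self, ne_eq, not_true_eq_false,
          and_false, if_false, if_true, List.length_cons]
        push_cast; omega
      · have hcx : ¬ String.ofList [c] = x := fun h => hxc h.symm
        simp only [hx, hxc, hcx, List.map_cons, List.count_cons, ne_eq, not_false_eq_true,
          and_self, if_true, if_false, List.length_cons, beq_iff_eq]
        push_cast; omega
    · simp [hx]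

-- B's zero-initialised tally: every lookup (with default 0) is 0.
theorem zeros_getD (ks : List String) (d : PySem.Dict String Int)
    (h : ∀ x, d.getD x 0 = 0) (x : String) :
    (ks.foldl (fun cd k => cd.insert k 0) d).getD x 0 = 0 := by
  induction ks generalizing d with
  | nil => exact h x
  | cons k ks ih =>
    simp only [List.foldl_cons]
    refine ih _ (fun y => ?_)
    rw [PySem.Dict.getD_insert]
    by_cases hy : y = k <;> simp [hy, h]

-- B's tally loop: each key's entry grows by its count among eaten's characters-as-strings.
theorem counts_getD (cs : List Char) (d : PySem.Dict String Int) (k : String) :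
    (cs.foldl (fun cd ch => cd.modify (String.ofList [ch]) 0 (fun v => v + 1)) d).getD k 0
      = d.getD k 0 + ((cs.map (fun c => String.ofList [c])).count k : Int) := by
  induction cs generalizing d with
  | nil => simp
  | cons c cs ih =>
    simp only [List.foldl_cons]
    rw [ih, PySem.Dict.getD_modify]
    by_cases hk : k = String.ofList [c]
    · subst hk; simp; ring
    · have : ¬ String.ofList [c] = k := fun h => hk h.symm
      simp [hk, this]

-- B's running maximum (first-wins under strict >) from some b is foldl max.
theorem optmax_from_some (vals : List Int) (b : Int) :
    vals.foldl (fun best v => match best with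
      | none => some v
      | some b => if v > b then some v else some b) (some b)
    = some (vals.foldl max b) := by
  induction vals generalizing b with
  | nil => rfl
  | cons v vs ih =>
    simp only [List.foldl_cons]
    have hinit : (if v > b then some v else some b) = some (max b v) := by
      by_cases h : v > b
      · rw [if_pos h, max_eq_right (by omega : b ≤ v)]
      · rw [if_neg h, max_eq_left (by omega : v ≤ b)]
    rw [hinit, ih]

-- B's running maximum equals Python max(...) (PySem.List.max? with identity key).
theorem optmax_eq (vals : List Int) :
    vals.foldl (fun best v => match best with
      | none => some v
      | some b => if v > b then some v else some b) none
    = PySem.List.max? vals (fun v => v) := by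
  cases vals with
  | nil => rfl
  | cons x t =>
    simp only [List.foldl_cons]
    rw [optmax_from_some, PySem.List.max?_id_cons]

-- ===== VERDICT (by name: the statement is the Claim_ definition above) =====
theorem nfruits_spec : Claim_equal_nfruits := by
  intro fruit eaten _ hpre
  obtain ⟨-, -, hall⟩ := hpre
  unfold Spec_nfruits
  simp only [nfruits, nfruits_alt]
  set d0 : PySem.Dict String Int := PySem.Dict.ofList fruit with hd0
  have hnd0 : d0.keys.Nodup := PySem.Dict.nodup_keys_ofList fruit
  have hmem : ∀ c ∈ eaten.toList, String.ofList [c] ∈ d0.keys := by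
    intro c hc
    have := (List.all_eq_true.1 hall) c hc
    exact (PySem.Dict.contains_iff_mem_keys d0 _).1 this
  -- phase 1
  obtain ⟨hk1, hg1⟩ := foldA1 eaten.toList d0 hmem
  set d1 := eaten.toList.foldl (fun d c => d.modify (String.ofList [c]) 0 (fun v => v - 1)) d0 with hd1
  have hnd1 : d1.keys.Nodup := by rw [hk1]; exact hnd0
  -- phase 2 on the prefix
  rw [PySem.Chars.slice_eq_listSlice, PySem.List.slice_to_neg_one]
  obtain ⟨hk2, hg2⟩ := foldAouter eaten.toList.dropLast d1 hnd1
  set d2 := eaten.toList.dropLast.foldl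
      (fun d i => d.keys.foldl
        (fun d' key => if key ≠ String.ofList [i] then d'.modify key 0 (fun v => v + 1) else d') d) d1 with hd2
  have hnd2 : d2.keys.Nodup := by rw [hk2, hk1]; exact hnd0
  -- counts is the counter of eaten's characters-as-strings
  have hcnt : ∀ k, (eaten.toList.foldl
      (fun cd ch => cd.modify (String.ofList [ch]) 0 (fun v => v + 1))
      (d0.keys.foldl (fun cd k => cd.insert k 0) PySem.Dict.empty)).getD k 0
      = ((eaten.toList.map (fun c => String.ofList [c])).count k : Int) := by
    intro k
    rw [counts_getD, zeros_getD d0.keys PySem.Dict.empty (fun x => PySem.Dict.getD_empty ..)]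
    ring
  -- per-key closed form for A's final dict
  have hfin : ∀ k ∈ d0.keys, d2.getD k 0
      = d0.getD k 0 + (if eaten.toList.isEmpty then 0 else (eaten.toList.length : Int) - 1)
        - 2 * ((eaten.toList.map (fun c => String.ofList [c])).count k : Int)
        + (if some k = (if eaten.toList.isEmpty then (none : Option String)
            else (PySem.Str.pyGet? eaten (-1)).map (fun c => String.ofList [c])) then 1 else 0) := by
    intro k hkmem
    rw [hg2 k, hg1 k, hk1]
    by_cases hne : eaten.toList = []
    · simp [hne, hkmem]
    · obtain ⟨l, a, hla⟩ : ∃ l a, eaten.toList = l ++ [a] :=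
        ⟨_, _, (List.dropLast_append_getLast hne).symm⟩
      have hdrop : eaten.toList.dropLast = l := by rw [hla, List.dropLast_concat]
      have hlast : PySem.Str.pyGet? eaten (-1) = some a := by
        rw [PySem.Str.pyGet?_eq, PySem.Chars.pyGet?_eq_listPyGet?, hla,
          PySem.List.pyGet?_neg_one_append_singleton]
      have hemp : eaten.toList.isEmpty = false := by
        simp [hne]
      rw [hdrop, hemp, hlast]
      simp only [Bool.false_eq_true, if_false, hkmem, if_true]
      have hcount : ((eaten.toList.map (fun c => String.ofList [c])).count k : Int)
          = ((l.map (fun c => String.ofList [c])).count k : Int)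
            + (if k = String.ofList [a] then 1 else 0) := by
        rw [hla]
        simp only [List.map_append, List.map_cons, List.map_nil, List.count_append,
          List.count_cons, List.count_nil]
        by_cases hka : k = String.ofList [a]
        · subst hka; simp
        · have : ¬ String.ofList [a] = k := fun h => hka h.symm
          simp [hka, this]
      have hlen : (eaten.toList.length : Int) = (l.length : Int) + 1 := by
        rw [hla, List.length_append, List.length_cons, List.length_nil]; push_cast; ring
      rw [hcount, hlen]
      simp only [Option.map_some, Option.some.injEq]
      split_ifs <;> ring
  -- both sides are a maximum over the same list of values
  have hvals : d2.values = d0.keys.map (fun k =>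
      d0.getD k 0 + (if eaten.toList.isEmpty then 0 else (eaten.toList.length : Int) - 1)
        - 2 * ((eaten.toList.map (fun c => String.ofList [c])).count k : Int)
        + (if some k = (if eaten.toList.isEmpty then (none : Option String)
            else (PySem.Str.pyGet? eaten (-1)).map (fun c => String.ofList [c])) then 1 else 0)) := by
    rw [PySem.Dict.values_eq_map_keys d2 hnd2 0, hk2, hk1]
    exact List.map_congr_left hfin
  rw [hvals]
  -- B's fold over items is the option-max fold over the same mapped values
  rw [PySem.Dict.items_eq_map_keys d0 hnd0 0]
  rw [← optmax_eq, List.foldl_map, List.foldl_map]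
  congr 1
  congr 1
  funext best k
  rw [hcnt k]
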